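-- pv_equiv track=rewrite | github.com/abhinaykrishna/PyCodes | collections.py | leap_gen
-- ===== SOURCE A (Python) =====
-- def check_leap(year):
--   if year % 4 == 0:
--     if year % 100 == 0:
--       if year % 400 == 0:
--         return True
--       else:
--         return False
--     else:
--       return True
--   else:
--     return False
--
-- def leap_gen(year):
--   result = []
--   if check_leap(year):
--     result = [year]
--     for i in range(15):
--       result.append(result[-1]+4)
--     return result
--   else:
--     for i in range(1,4):
--       if check_leap(year+i):
--         found_nearest = year+i
--     result = [found_nearest]
--     for i in range(15):
--       result.append(result[-1]+4)
--     return result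
-- ===== SOURCE B (Python) =====
-- def leap_gen(year):
--   # next multiple of 4 at or after year, in closed form (no search loop, no branches)
--   start = year + (-year) % 4
--   return [start + 4 * i for i in range(16)]
-- ===== Notes on version B (the rewrite author's own statement) =====
-- stated objective: simpler
-- what changed: B computes the next multiple of 4 in closed form (year + (-year) % 4) and emits the 16 years arithmetically, eliminating A's leap-year test, its two near-identical branches and both its search and cumulative-append loops entirely.
import Mathlib
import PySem

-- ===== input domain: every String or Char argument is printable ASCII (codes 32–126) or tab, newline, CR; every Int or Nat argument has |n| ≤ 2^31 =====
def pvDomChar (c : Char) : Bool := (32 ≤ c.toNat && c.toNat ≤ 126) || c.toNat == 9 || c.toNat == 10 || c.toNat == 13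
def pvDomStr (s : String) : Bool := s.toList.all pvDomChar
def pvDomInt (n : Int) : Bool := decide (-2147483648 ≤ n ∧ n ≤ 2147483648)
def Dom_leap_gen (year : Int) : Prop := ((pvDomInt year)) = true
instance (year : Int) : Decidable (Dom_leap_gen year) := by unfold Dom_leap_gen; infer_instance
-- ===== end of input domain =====

-- B replaces A's leap-year test, its two near-identical branches and its search and
-- cumulative-append loops by a closed-form arithmetic computation (objective: simpler).
-- Pre_ excludes years whose following window contains no leap year, where A raises
-- (UnboundLocalError); there B still returns the stride-4 list from the window's multiple of 4.


-- ===== PORT A =====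
def check_leap (year : Int) : Bool :=
  if PySem.Int.mod year 4 == 0 then
    if PySem.Int.mod year 100 == 0 then
      if PySem.Int.mod year 400 == 0 then true
      else false
    else true
  else false

def leap_gen (year : Int) : List Int :=
  if check_leap year then
    (List.range 15).foldl
      (fun r _ => r ++ [(PySem.List.pyGet? r (-1)).getD 0 + 4]) [year]
  else
    -- 'found_nearest' may be unbound in Python (excluded by Pre_); modelled as Option
    let found_nearest :=
      (PySem.List.pyRange 1 4 1).foldl
        (fun s i => if check_leap (year + i) then some (year + i) else s)
        (none : Option Int)
    (List.range 15).foldl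
      (fun r _ => r ++ [(PySem.List.pyGet? r (-1)).getD 0 + 4]) [found_nearest.getD 0]

-- ===== PORT B =====
def leap_gen_alt (year : Int) : List Int :=
  let start := year + PySem.Int.mod (-year) 4
  (PySem.List.pyRange 0 16 1).map (fun i => start + 4 * i)

-- ===== PRECONDITION & SPEC =====
-- the Gregorian leap-year condition, written arithmetically
def pvIsLeap (y : Int) : Prop := y % 4 = 0 ∧ (y % 100 ≠ 0 ∨ y % 400 = 0)
-- Pre_ excludes exactly the years whose search window contains no leap year: there A raises.
def Pre_leap_gen (year : Int) : Prop :=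
  pvIsLeap year ∨ pvIsLeap (year + 1) ∨ pvIsLeap (year + 2) ∨ pvIsLeap (year + 3)
instance (year : Int) : Decidable (Pre_leap_gen year) := by unfold Pre_leap_gen pvIsLeap; infer_instance

def pvWitness_leap_gen : Int := (2001)

def Spec_leap_gen (year : Int) (out : List Int) : Prop := out = leap_gen_alt year
instance (year : Int) (out : List Int) : Decidable (Spec_leap_gen year out) := by unfold Spec_leap_gen; infer_instance

-- ===== CLAIM (what is proved, stated in full; the proofs are below) =====
def Claim_equal_leap_gen : Prop := ∀ (year : Int), Dom_leap_gen year → Pre_leap_gen year → Spec_leap_gen year (leap_gen year)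

-- ===== LEMMAS AND PROOFS =====

theorem check_leap_iff (y : Int) : check_leap y = true ↔ pvIsLeap y := by
  simp [check_leap, pvIsLeap]

theorem mod4_of_leap {y : Int} (h : check_leap y = true) : y % 4 = 0 :=
  ((check_leap_iff y).mp h).1

-- A's cumulative-append loop, characterised by induction on the number of appends.
theorem loop_inv (n : Nat) (s : Int) :
    (List.range n).foldl
      (fun r _ => r ++ [(PySem.List.pyGet? r (-1)).getD 0 + 4]) [s]
    = (List.range (n + 1)).map (fun k : Nat => s + 4 * (k : Int)) := by
  induction n with
  | zero => simp
  | succ n ih =>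
      rw [List.range_succ, List.foldl_append, ih]
      have hlast : (PySem.List.pyGet?
          ((List.range (n + 1)).map (fun k : Nat => s + 4 * (k : Int))) (-1)).getD 0
          = s + 4 * (n : Int) := by
        rw [PySem.List.pyGet?_neg_one]
        rw [List.range_succ, List.map_append]
        simp
      simp only [List.foldl_cons, List.foldl_nil, hlast]
      rw [List.range_succ (n := n + 1), List.map_append]
      simp
      ring

-- A's loop from seed s equals B's arithmetic emission from start s.
theorem loop_eq_map (s : Int) :
    (List.range 15).foldl
      (fun r _ => r ++ [(PySem.List.pyGet? r (-1)).getD 0 + 4]) [s]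
    = (PySem.List.pyRange 0 16 1).map (fun i => s + 4 * i) := by
  rw [loop_inv, PySem.List.pyRange_one, List.map_map]
  simp [Function.comp]

theorem leap_gen_spec_aux : ∀ (year : Int), Pre_leap_gen year → leap_gen year = leap_gen_alt year := by
  intro year hpre
  unfold leap_gen leap_gen_alt
  have hmod : PySem.Int.mod (-year) 4 = (-year) % 4 :=
    PySem.Int.mod_eq_emod_of_pos (by norm_num)
  have hr13 : PySem.List.pyRange 1 4 1 = [1, 2, 3] := by decide
  rcases h0 : check_leap year with _ | _
  · -- year itself is not leap: Pre_ forces a leap year in year+1..year+3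
    have hex : check_leap (year + 1) = true ∨ check_leap (year + 2) = true ∨
        check_leap (year + 3) = true := by
      rcases hpre with h | h | h | h
      · exact absurd ((check_leap_iff _).mpr h) (by simp [h0])
      · exact Or.inl ((check_leap_iff _).mpr h)
      · exact Or.inr (Or.inl ((check_leap_iff _).mpr h))
      · exact Or.inr (Or.inr ((check_leap_iff _).mpr h))
    rcases h1 : check_leap (year + 1) with _ | _ <;>
    rcases h2 : check_leap (year + 2) with _ | _ <;>
    rcases h3 : check_leap (year + 3) with _ | _ <;>
      simp [h1, h2, h3] at hex <;>
      [ (have := mod4_of_leap h3);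
        (have := mod4_of_leap h2);
        (exact absurd (by omega : ¬ ((year+2) % 4 = 0 ∧ (year+3) % 4 = 0))
          (by exact fun h => h ⟨mod4_of_leap h2, mod4_of_leap h3⟩));
        (have := mod4_of_leap h1);
        (exact absurd (by omega : ¬ ((year+1) % 4 = 0 ∧ (year+3) % 4 = 0))
          (by exact fun h => h ⟨mod4_of_leap h1, mod4_of_leap h3⟩));
        (exact absurd (by omega : ¬ ((year+1) % 4 = 0 ∧ (year+2) % 4 = 0))
          (by exact fun h => h ⟨mod4_of_leap h1, mod4_of_leap h2⟩));
        (exact absurd (by omega : ¬ ((year+1) % 4 = 0 ∧ (year+2) % 4 = 0))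
          (by exact fun h => h ⟨mod4_of_leap h1, mod4_of_leap h2⟩))] <;>
      · have hm : (-year) % 4 = year + ((-year) % 4) - year := by ring_nf
        simp only [hr13, hmod, Bool.false_eq_true, if_false]
        simp [h1, h2, h3, loop_eq_map]
        omega
  · -- year is leap: start = year since year % 4 = 0
    have hm := mod4_of_leap h0
    have : (-year) % 4 = 0 := by omega
    simp [loop_eq_map, this]

-- ===== VERDICT (by name: the statement is the Claim_ definition above) =====
theorem leap_gen_spec : Claim_equal_leap_gen := by
  intro year _ hpre
  exact leap_gen_spec_aux year hpre
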